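-- pv_equiv track=rewrite | github.com/jasminezhoulab/cfSNV | inst/python/py10.machinelearn.expand_features_nonoverlap.py | transform_CIGAR_to_expanded_features
-- ===== SOURCE A (Python) =====
-- CIGAR_LETTERS = ['M', 'I', 'D', 'N', 'S', 'H', 'P', '=', 'X']
--
-- def transform_CIGAR_to_expanded_features(unexpanded_features):
-- 	# transform data line by line
-- 	# unexpanded_features is a CIGAR string to be expanded
-- 	# unexpanded_features is finally changed to a set of categorical data, where each column is 1 or 0 indicating whether a character is in the CIGAR string or not
-- 	expanded_features = []
-- 	for i in CIGAR_LETTERS: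
-- 		if i in unexpanded_features:
-- 			expanded_features.append('1')
-- 		else:
-- 			expanded_features.append('0')
-- 	return expanded_features
-- ===== SOURCE B (Python) =====
-- CIGAR_LETTERS = ['M', 'I', 'D', 'N', 'S', 'H', 'P', '=', 'X']
--
-- def transform_CIGAR_to_expanded_features(unexpanded_features):
--     # One pass over the CIGAR string maintaining a presence map, then read
--     # the flags out in CIGAR_LETTERS order.
--     flags = {c: '0' for c in CIGAR_LETTERS}
--     for ch in unexpanded_features:
--         if ch in flags:
--             flags[ch] = '1'
--     return [flags[c] for c in CIGAR_LETTERS]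
-- ===== Notes on version B (the rewrite author's own statement) =====
-- stated objective: alternative
-- what changed: Replaces the per-letter substring scan of the input (9 rescans) with a single pass over the input characters that marks a letter->flag dict, then reads the flags out in CIGAR_LETTERS order.
import Mathlib
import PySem

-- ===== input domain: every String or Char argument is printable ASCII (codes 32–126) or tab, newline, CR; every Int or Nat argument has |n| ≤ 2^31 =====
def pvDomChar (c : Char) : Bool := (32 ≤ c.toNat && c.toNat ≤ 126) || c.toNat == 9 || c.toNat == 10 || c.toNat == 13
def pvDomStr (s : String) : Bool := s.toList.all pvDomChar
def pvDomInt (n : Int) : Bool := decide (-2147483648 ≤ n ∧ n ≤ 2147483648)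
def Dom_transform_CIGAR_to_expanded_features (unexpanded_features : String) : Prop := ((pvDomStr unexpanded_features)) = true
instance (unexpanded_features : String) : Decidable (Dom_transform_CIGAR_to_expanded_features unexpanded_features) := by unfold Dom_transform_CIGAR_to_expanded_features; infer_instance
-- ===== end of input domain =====

-- B builds the 0/1 flags in one pass over the input via a letter->flag dict instead of
-- rescanning the string once per CIGAR letter (objective: alternative decomposition).


-- ===== PORT A =====
-- CIGAR_LETTERS: the module constant (a list of one-character Python strings)
def CIGAR_LETTERS : List String := ["M", "I", "D", "N", "S", "H", "P", "=", "X"]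

-- for i in CIGAR_LETTERS: append '1' if `i in unexpanded_features` (substring test) else '0'
def transform_CIGAR_to_expanded_features (unexpanded_features : String) : List String :=
  CIGAR_LETTERS.foldl
    (fun expanded_features i =>
      if PySem.Str.isIn i unexpanded_features then expanded_features ++ ["1"]
      else expanded_features ++ ["0"])
    []

-- ===== PORT B =====
-- Source B iterates over the characters of the string; a Python character is a 1-char string,
-- ported as Char (the dict is keyed by those characters).
def cigarLetterChars : List Char := ['M', 'I', 'D', 'N', 'S', 'H', 'P', '=', 'X']

def transform_CIGAR_to_expanded_features_alt (unexpanded_features : String) : List String :=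
  -- flags = {c: '0' for c in CIGAR_LETTERS}
  let flags0 : PySem.Dict Char String :=
    cigarLetterChars.foldl (fun d c => d.insert c "0") PySem.Dict.empty
  -- for ch in unexpanded_features: if ch in flags: flags[ch] = '1'
  let flags :=
    unexpanded_features.toList.foldl
      (fun d ch => if d.contains ch then d.insert ch "1" else d) flags0
  -- [flags[c] for c in CIGAR_LETTERS]  (each key is present; flags[c] = its stored value)
  cigarLetterChars.map (fun c => flags.getD c "0")

-- ===== PRECONDITION & SPEC =====
def Spec_transform_CIGAR_to_expanded_features (unexpanded_features : String) (out : List String) : Prop := out = transform_CIGAR_to_expanded_features_alt unexpanded_features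
instance (unexpanded_features : String) (out : List String) : Decidable (Spec_transform_CIGAR_to_expanded_features unexpanded_features out) := by unfold Spec_transform_CIGAR_to_expanded_features; infer_instance

-- ===== CLAIM (what is proved, stated in full; the proofs are below) =====
def Claim_equal_transform_CIGAR_to_expanded_features : Prop := ∀ (unexpanded_features : String), Dom_transform_CIGAR_to_expanded_features unexpanded_features → Spec_transform_CIGAR_to_expanded_features unexpanded_features (transform_CIGAR_to_expanded_features unexpanded_features)

-- ===== LEMMAS AND PROOFS =====

-- a one-character substring test is character membership
theorem singleton_infix_iff_mem (c : Char) (l : List Char) : [c] <:+: l ↔ c ∈ l := by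
  constructor
  · intro h
    exact h.sublist.subset (List.mem_singleton_self c)
  · intro h
    obtain ⟨s, t, rfl⟩ := List.append_of_mem h
    exact ⟨s, t, by simp⟩

-- the marking loop: for a key already in the dict, its final value is "1" iff it occurs in l
theorem get?_mark_loop (l : List Char) (d : PySem.Dict Char String) (c : Char)
    (hc : d.contains c = true) :
    (l.foldl (fun d ch => if d.contains ch then d.insert ch "1" else d) d).get? c
      = if c ∈ l then some "1" else d.get? c := by
  induction l generalizing d with
  | nil => simp
  | cons ch rest ih =>
    by_cases hcc : ch = c
    · subst hcc
      simp only [List.foldl_cons, hc, if_true, List.mem_cons, true_or, if_true]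
      rw [ih _ (PySem.Dict.contains_insert_self d ch "1")]
      by_cases hm : ch ∈ rest
      · simp [hm]
      · simp [hm, PySem.Dict.get?_insert_self]
    · have hstep : ∀ d' : PySem.Dict Char String,
          (if d'.contains ch then d'.insert ch "1" else d').get? c = d'.get? c := by
        intro d'
        by_cases h : d'.contains ch
        · simp [h, PySem.Dict.get?_insert_of_ne _ _ (fun h' => hcc h'.symm)]
        · simp [h]
      have hstepc : (if d.contains ch then d.insert ch "1" else d).contains c = true := by
        rw [PySem.Dict.contains_eq_isSome_get?, hstep d, ← PySem.Dict.contains_eq_isSome_get?]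
        exact hc
      simp only [List.foldl_cons, List.mem_cons]
      rw [ih _ hstepc, hstep d]
      rw [if_congr (or_iff_right (fun h => hcc h.symm)) rfl rfl]

-- per CIGAR letter, B's flag equals A's membership flag
theorem flag_eq (s : String) (c : Char)
    (hc : c ∈ (['M', 'I', 'D', 'N', 'S', 'H', 'P', '=', 'X'] : List Char)) :
    ((s.toList.foldl (fun d ch => if d.contains ch then d.insert ch "1" else d)
        ((['M', 'I', 'D', 'N', 'S', 'H', 'P', '=', 'X'] : List Char).foldl
          (fun d c => d.insert c "0") PySem.Dict.empty)).getD c "0")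
      = if c ∈ s.toList then "1" else "0" := by
  have hc0 : ((['M', 'I', 'D', 'N', 'S', 'H', 'P', '=', 'X'] : List Char).foldl
      (fun d c => d.insert c "0") PySem.Dict.empty).contains c = true := by
    fin_cases hc <;> decide
  have hg0 : ((['M', 'I', 'D', 'N', 'S', 'H', 'P', '=', 'X'] : List Char).foldl
      (fun d c => d.insert c "0") PySem.Dict.empty).get? c = some "0" := by
    fin_cases hc <;> decide
  rw [PySem.Dict.getD_eq_get?_getD, get?_mark_loop _ _ _ hc0, hg0]
  by_cases hm : c ∈ s.toList <;> simp [hm]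

theorem isIn_singleton (c : Char) (s : String) :
    PySem.Str.isIn (String.ofList [c]) s = decide (c ∈ s.toList) := by
  by_cases hm : c ∈ s.toList
  · simp only [hm, decide_true]
    rw [PySem.Str.isIn_iff_infix]
    simp only [String.toList_ofList]
    exact (singleton_infix_iff_mem c s.toList).mpr hm
  · simp only [hm, decide_false]
    rw [← Bool.not_eq_true, PySem.Str.isIn_iff_infix]
    simp only [String.toList_ofList]
    exact fun h => hm ((singleton_infix_iff_mem c s.toList).mp h)

-- ===== VERDICT (by name: the statement is the Claim_ definition above) =====
theorem transform_CIGAR_to_expanded_features_spec : Claim_equal_transform_CIGAR_to_expanded_features := by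
  intro s _
  show transform_CIGAR_to_expanded_features s = transform_CIGAR_to_expanded_features_alt s
  unfold transform_CIGAR_to_expanded_features transform_CIGAR_to_expanded_features_alt
  rw [show (fun (expanded_features : List String) (i : String) =>
        if PySem.Str.isIn i s then expanded_features ++ ["1"] else expanded_features ++ ["0"])
      = (fun expanded_features i =>
        expanded_features ++ [if PySem.Str.isIn i s then "1" else "0"]) from by
        funext acc i; split <;> rfl,
     PySem.List.foldl_append_singleton_eq_map]
  simp only [List.nil_append, CIGAR_LETTERS, cigarLetterChars, List.map_cons, List.map_nil]
  rw [flag_eq s 'M' (by decide), flag_eq s 'I' (by decide), flag_eq s 'D' (by decide),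
      flag_eq s 'N' (by decide), flag_eq s 'S' (by decide), flag_eq s 'H' (by decide),
      flag_eq s 'P' (by decide), flag_eq s '=' (by decide), flag_eq s 'X' (by decide)]
  have hM : "M" = String.ofList ['M'] := rfl
  have hI : "I" = String.ofList ['I'] := rfl
  have hD : "D" = String.ofList ['D'] := rfl
  have hN : "N" = String.ofList ['N'] := rfl
  have hS : "S" = String.ofList ['S'] := rfl
  have hH : "H" = String.ofList ['H'] := rfl
  have hP : "P" = String.ofList ['P'] := rfl
  have hE : "=" = String.ofList ['='] := rfl
  have hX : "X" = String.ofList ['X'] := rfl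
  rw [hM, hI, hD, hN, hS, hH, hP, hE, hX]
  simp only [isIn_singleton, decide_eq_true_eq]
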